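-- pv_equiv track=rewrite | github.com/RACCHUS/LicensePlateInformation | src/utils/helpers.py | validate_plate_pattern
-- ===== SOURCE A (Python) =====
-- def validate_plate_pattern(plate: str, pattern: str) -> bool:
--     """Check if plate matches a given pattern
--
--     Args:
--         plate: Plate text to validate
--         pattern: Pattern to match against
--
--     Pattern conventions:
--         - Known literal prefixes: UG, CV, DV, GT (match exactly)
--         - Standard patterns use placeholders:
--           * A, B, C = any letter (placeholder)
--           * 1, 2, 3, 4 = any digit (placeholder)
--           * X = any letter or digit (wildcard)
--           * - = literal hyphen
--         - Single letter + numbers: T1234, F1234 = literal letter + placeholder digits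
--
--     Returns:
--         True if plate matches pattern
--     """
--     if not plate or not pattern:
--         return False
--
--     plate = plate.upper().strip()
--     pattern = pattern.upper().strip()
--
--     # Check length match
--     if len(plate) != len(pattern):
--         return False
--
--     # Known literal prefixes that should match exactly
--     literal_prefixes = {
--         'UG': 'University of Georgia',
--         'GT': 'Georgia Tech',
--         'CV': 'Classic Vehicle',
--         'DV': 'Disabled Veteran',
--     }
--
--     # Check for literal prefix patterns
--     for prefix in literal_prefixes:
--         if pattern.startswith(prefix):
--             # This prefix must match exactly
--             if not plate.startswith(prefix):
--                 return False
--             # Validate the rest of the pattern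
--             return validate_plate_pattern(plate[len(prefix):], pattern[len(prefix):])
--
--     # Check for single-letter literal patterns (T1234, F1234)
--     if len(pattern) >= 2 and pattern[0].isalpha() and pattern[1].isdigit():
--         # First character is literal, rest are digit placeholders
--         if plate[0] != pattern[0]:
--             return False
--         # Check remaining digits
--         for i in range(1, len(pattern)):
--             if pattern[i].isdigit():
--                 if not plate[i].isdigit():
--                     return False
--             else:
--                 # Handle any other characters (shouldn't happen in this case)
--                 if plate[i] != pattern[i]:
--                     return False
--         return True
--
--     # For all other patterns, treat as placeholders
--     for i, (p_char, pat_char) in enumerate(zip(plate, pattern)):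
--         if pat_char == 'X':
--             # X matches any letter or digit
--             if not p_char.isalnum():
--                 return False
--         elif pat_char == '-':
--             # Literal hyphen
--             if p_char != '-':
--                 return False
--         elif pat_char.isalpha():
--             # Pattern letter - treat as placeholder for any letter
--             if not p_char.isalpha():
--                 return False
--         elif pat_char.isdigit():
--             # Pattern digit - treat as placeholder for any digit
--             if not p_char.isdigit():
--                 return False
--         else:
--             # Any other character should match exactly
--             if p_char != pat_char:
--                 return False
--
--     return True
-- ===== SOURCE B (Python) =====
-- def _match(p, q):
--     if q == 'X':
--         return p.isalnum()
--     if q == '-':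
--         return p == '-'
--     if q.isalpha():
--         return p.isalpha()
--     if q.isdigit():
--         return p.isdigit()
--     return p == q
--
--
-- def validate_plate_pattern(plate: str, pattern: str) -> bool:
--     # Iterative prefix-stripping phase: keep only the current (plate, pattern)
--     # slices as state; re-normalize and re-check on every round, like each
--     # recursion level does.
--     while True:
--         if not plate or not pattern:
--             return False
--         plate = plate.upper().strip()
--         pattern = pattern.upper().strip()
--         if len(plate) != len(pattern):
--             return False
--         for prefix in ('UG', 'GT', 'CV', 'DV'):
--             if pattern.startswith(prefix):
--                 if not plate.startswith(prefix):
--                     return False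
--                 plate = plate[len(prefix):]
--                 pattern = pattern[len(prefix):]
--                 break
--         else:
--             break
--     if len(pattern) >= 2 and pattern[0].isalpha() and pattern[1].isdigit():
--         return plate[0] == pattern[0] and all(
--             (p.isdigit() if q.isdigit() else p == q)
--             for p, q in zip(plate[1:], pattern[1:]))
--     return all(_match(p, q) for p, q in zip(plate, pattern))
-- ===== Notes on version B (the rewrite author's own statement) =====
-- stated objective: alternative
-- what changed: Replaces A's tail recursion with an explicit while loop maintaining only the current (plate, pattern) slices, and factors the per-character placeholder checks into a separate _match helper applied via all() over zip, instead of A's indexed loops.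
import Mathlib
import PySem

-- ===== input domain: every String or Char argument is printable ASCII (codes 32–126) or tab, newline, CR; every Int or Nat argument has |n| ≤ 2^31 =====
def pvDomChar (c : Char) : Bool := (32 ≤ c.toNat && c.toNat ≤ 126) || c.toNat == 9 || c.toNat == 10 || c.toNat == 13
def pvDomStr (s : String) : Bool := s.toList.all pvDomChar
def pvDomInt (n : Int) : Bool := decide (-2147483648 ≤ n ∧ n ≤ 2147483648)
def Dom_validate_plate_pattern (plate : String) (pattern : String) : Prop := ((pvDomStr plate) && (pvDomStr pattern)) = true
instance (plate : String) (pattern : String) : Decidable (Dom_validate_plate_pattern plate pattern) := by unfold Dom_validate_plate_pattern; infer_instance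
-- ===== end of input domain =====

-- B rewrites A's tail recursion as an explicit loop with (plate, pattern) state plus a
-- separate per-character matcher helper (objective: idiomatic/alternative decomposition, same cost).

-- ===== PORT A =====
-- the keys of A's literal_prefixes dict, in insertion order
def pvPrefixesA : List (List Char) := [['U','G'], ['G','T'], ['C','V'], ['D','V']]

-- A's recursion, with fuel (each recursive call drops a 2-char prefix, so
-- pattern-length + 1 fuel is never exhausted)
def pvGoA : Nat → List Char → List Char → Bool
  | 0, _, _ => false
  | f+1, plate0, pattern0 =>
    if plate0.isEmpty || pattern0.isEmpty then false
    else
      let pl := PySem.Chars.strip (PySem.Chars.upper plate0)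
      let pa := PySem.Chars.strip (PySem.Chars.upper pattern0)
      if pl.length ≠ pa.length then false
      else
        match pvPrefixesA.find? (fun pre => PySem.Chars.startswith pa pre) with
        | some pre =>
          if PySem.Chars.startswith pl pre then
            pvGoA f (PySem.List.slice pl (some (pre.length : Int)) none)
                    (PySem.List.slice pa (some (pre.length : Int)) none)
          else false
        | none =>
          if decide (2 ≤ pa.length) && PySem.Chars.isalpha (PySem.List.pyGetD pa 0 ' ')
              && PySem.Chars.isdigit (PySem.List.pyGetD pa 1 ' ') then
            if PySem.List.pyGetD pl 0 ' ' ≠ PySem.List.pyGetD pa 0 ' ' then false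
            else
              ((pl.drop 1).zip (pa.drop 1)).all (fun pq =>
                if PySem.Chars.isdigit pq.2 then PySem.Chars.isdigit pq.1 else pq.1 == pq.2)
          else
            (pl.zip pa).all (fun pq =>
              if pq.2 == 'X' then PySem.Chars.isalnum pq.1
              else if pq.2 == '-' then pq.1 == '-'
              else if PySem.Chars.isalpha pq.2 then PySem.Chars.isalpha pq.1
              else if PySem.Chars.isdigit pq.2 then PySem.Chars.isdigit pq.1
              else pq.1 == pq.2)

def validate_plate_pattern (plate : String) (pattern : String) : Bool :=
  pvGoA (pattern.toList.length + 1) plate.toList pattern.toList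

-- ===== PORT B =====
-- one round of B's while loop: fail / exit the loop with the final strings / continue
inductive PvStepRes where
  | fail : PvStepRes
  | done : List Char → List Char → PvStepRes
  | cont : List Char → List Char → PvStepRes
deriving DecidableEq, Repr

def pvStepB (s : List Char × List Char) : PvStepRes :=
  if s.1.isEmpty || s.2.isEmpty then .fail
  else
    let pl := PySem.Chars.strip (PySem.Chars.upper s.1)
    let pa := PySem.Chars.strip (PySem.Chars.upper s.2)
    if pl.length ≠ pa.length then .fail
    else
      match [['U','G'], ['G','T'], ['C','V'], ['D','V']].find?
              (fun pre => PySem.Chars.startswith pa pre) with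
      | some pre =>
        if PySem.Chars.startswith pl pre then .cont (pl.drop pre.length) (pa.drop pre.length)
        else .fail
      | none => .done pl pa

-- the while loop itself: none = returned False inside the loop
def pvLoopB : Nat → List Char × List Char → Option (List Char × List Char)
  | 0, _ => none
  | f+1, s =>
    match pvStepB s with
    | .fail => none
    | .done pl pa => some (pl, pa)
    | .cont pl pa => pvLoopB f (pl, pa)

-- B's _match helper
def pvMatchB (p q : Char) : Bool :=
  if q == 'X' then PySem.Chars.isalnum p
  else if q == '-' then p == '-'
  else if PySem.Chars.isalpha q then PySem.Chars.isalpha p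
  else if PySem.Chars.isdigit q then PySem.Chars.isdigit p
  else p == q

def pvTailB (pl pa : List Char) : Bool :=
  if decide (2 ≤ pa.length) && PySem.Chars.isalpha (PySem.List.pyGetD pa 0 ' ')
      && PySem.Chars.isdigit (PySem.List.pyGetD pa 1 ' ') then
    (PySem.List.pyGetD pl 0 ' ' == PySem.List.pyGetD pa 0 ' ')
      && ((pl.drop 1).zip (pa.drop 1)).all (fun pq =>
            if PySem.Chars.isdigit pq.2 then PySem.Chars.isdigit pq.1 else pq.1 == pq.2)
  else (pl.zip pa).all (fun pq => pvMatchB pq.1 pq.2)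

def validate_plate_pattern_alt (plate : String) (pattern : String) : Bool :=
  match pvLoopB (pattern.toList.length + 1) (plate.toList, pattern.toList) with
  | none => false
  | some (pl, pa) => pvTailB pl pa

-- ===== PRECONDITION & SPEC =====
def Spec_validate_plate_pattern (plate : String) (pattern : String) (out : Bool) : Prop := out = validate_plate_pattern_alt plate pattern
instance (plate : String) (pattern : String) (out : Bool) : Decidable (Spec_validate_plate_pattern plate pattern out) := by unfold Spec_validate_plate_pattern; infer_instance

-- ===== CLAIM (what is proved, stated in full; the proofs are below) =====
def Claim_equal_validate_plate_pattern : Prop := ∀ (plate : String) (pattern : String), Dom_validate_plate_pattern plate pattern → Spec_validate_plate_pattern plate pattern (validate_plate_pattern plate pattern)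

-- ===== LEMMAS AND PROOFS =====
theorem pvTailA_eq (pl pa : List Char) :
    (if decide (2 ≤ pa.length) && PySem.Chars.isalpha (PySem.List.pyGetD pa 0 ' ')
        && PySem.Chars.isdigit (PySem.List.pyGetD pa 1 ' ') then
      if PySem.List.pyGetD pl 0 ' ' ≠ PySem.List.pyGetD pa 0 ' ' then false
      else ((pl.drop 1).zip (pa.drop 1)).all (fun pq =>
        if PySem.Chars.isdigit pq.2 then PySem.Chars.isdigit pq.1 else pq.1 == pq.2)
     else (pl.zip pa).all (fun pq =>
        if pq.2 == 'X' then PySem.Chars.isalnum pq.1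
        else if pq.2 == '-' then pq.1 == '-'
        else if PySem.Chars.isalpha pq.2 then PySem.Chars.isalpha pq.1
        else if PySem.Chars.isdigit pq.2 then PySem.Chars.isdigit pq.1
        else pq.1 == pq.2)) = pvTailB pl pa := by
  unfold pvTailB pvMatchB
  by_cases h : (decide (2 ≤ pa.length) && PySem.Chars.isalpha (PySem.List.pyGetD pa 0 ' ')
      && PySem.Chars.isdigit (PySem.List.pyGetD pa 1 ' ')) = true
  · simp only [if_pos h]
    by_cases h2 : PySem.List.pyGetD pl 0 ' ' = PySem.List.pyGetD pa 0 ' '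
    · simp [h2]
    · simp [h2]
  · simp only [if_neg h]

theorem pvGoA_eq_loop (f : Nat) (pl pa : List Char) :
    pvGoA f pl pa =
      (match pvLoopB f (pl, pa) with
       | none => false
       | some (x, y) => pvTailB x y) := by
  induction f generalizing pl pa with
  | zero => rfl
  | succ f ih =>
    simp only [pvGoA, pvLoopB, pvStepB]
    have hP : pvPrefixesA = [['U','G'], ['G','T'], ['C','V'], ['D','V']] := rfl
    rw [hP]
    by_cases h1 : (pl.isEmpty || pa.isEmpty) = true
    · simp only [if_pos h1]
    · simp only [if_neg h1]
      by_cases h2 : (PySem.Chars.strip (PySem.Chars.upper pl)).length ≠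
          (PySem.Chars.strip (PySem.Chars.upper pa)).length
      · simp only [if_pos h2]
      · simp only [if_neg h2]
        cases hfind : [['U','G'], ['G','T'], ['C','V'], ['D','V']].find?
            (fun pre => PySem.Chars.startswith (PySem.Chars.strip (PySem.Chars.upper pa)) pre) with
        | some pre =>
          by_cases h3 : PySem.Chars.startswith (PySem.Chars.strip (PySem.Chars.upper pl)) pre = true
          · simp only [if_pos h3]
            have hslice : ∀ (xs : List Char),
                PySem.List.slice xs (some (pre.length : Int)) none = xs.drop pre.length := by
              intro xs
              simp [PySem.List.slice_from]
            rw [hslice, hslice, ih]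
          · simp only [if_neg h3]
        | none =>
          exact pvTailA_eq _ _

-- ===== VERDICT (by name: the statement is the Claim_ definition above) =====
theorem validate_plate_pattern_spec : Claim_equal_validate_plate_pattern := by
  intro plate pattern _
  unfold Spec_validate_plate_pattern validate_plate_pattern validate_plate_pattern_alt
  rw [pvGoA_eq_loop]
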